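-- pv_equiv track=rewrite | github.com/addisonkline/aoc-2025 | day_10/utils.py | get_line_buttons
-- ===== SOURCE A (Python) =====
-- def get_line_buttons(
--     line_str: str
-- ) -> list[list[int]]:
--     """
--     Convert a raw string into a list of buttons (list of list of ints).
--     """
--     buttons: list[list[int]] = []
--     buttons_lst = line_str.split(")")
--
--     for button_str in buttons_lst:
--         button_nums: list[int] = []
--         for char in button_str:
--             try:
--                 num = int(char)
--                 button_nums.append(num)
--             except Exception:
--                 continue
--
--         buttons.append(button_nums)
--
--     return buttons[:-1] # the last entry is an empty list
-- ===== SOURCE B (Python) =====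
-- def get_line_buttons(
--     line_str: str
-- ) -> list[list[int]]:
--     """
--     Single pass over the characters: accumulate digits into `current`,
--     flush `current` into `result` at each ')'. The segment after the last
--     ')' is never flushed, matching A's buttons[:-1].
--     """
--     result: list[list[int]] = []
--     current: list[int] = []
--     for char in line_str:
--         try:
--             current.append(int(char))
--         except Exception:
--             if char == ')':
--                 result.append(current)
--                 current = []
--     return result
-- ===== Notes on version B (the rewrite author's own statement) =====
-- stated objective: alternative
-- what changed: B replaces A's split-on-separator pass followed by a per-segment digit scan and a final drop of the last segment with a single pass over the characters that flushes a running accumulator at each closing parenthesis and discards the unterminated tail.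
import Mathlib
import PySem

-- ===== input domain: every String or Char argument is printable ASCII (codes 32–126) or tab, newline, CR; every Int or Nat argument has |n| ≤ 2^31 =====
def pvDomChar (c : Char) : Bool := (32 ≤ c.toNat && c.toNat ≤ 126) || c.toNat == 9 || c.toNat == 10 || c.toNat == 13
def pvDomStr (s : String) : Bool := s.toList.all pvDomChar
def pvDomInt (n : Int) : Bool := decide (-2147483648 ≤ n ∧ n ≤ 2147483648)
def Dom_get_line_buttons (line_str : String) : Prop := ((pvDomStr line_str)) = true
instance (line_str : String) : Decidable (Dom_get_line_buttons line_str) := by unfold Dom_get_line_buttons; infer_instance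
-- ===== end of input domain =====

-- B is a single one-pass accumulator scan instead of A's split-then-scan-segments; same cost, different decomposition.

-- int(char) for a one-character string (shared primitive of both Pythons' `int(char)`)
def pyIntChar (c : Char) : Option Int := PySem.Int.ofStr? (String.ofList [c])

-- ===== PORT A =====
def get_line_buttons (line_str : String) : List (List Int) :=
  -- buttons_lst = line_str.split(")")  (sep ≠ "", so Chars.splitOn is exact)
  let buttons_lst := PySem.Chars.splitOn line_str.toList [')']
  let buttons := buttons_lst.foldl (fun buttons button_str =>
      let button_nums := button_str.foldl (fun acc ch =>
          match pyIntChar ch with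
          | some num => acc ++ [num]
          | none => acc) []
      buttons ++ [button_nums]) []
  PySem.List.slice buttons none (some (-1))   -- buttons[:-1]

-- ===== PORT B =====
def get_line_buttons_alt (line_str : String) : List (List Int) :=
  (line_str.toList.foldl
      (fun (st : List (List Int) × List Int) ch =>
        match pyIntChar ch with
        | some n => (st.1, st.2 ++ [n])
        | none => if ch = ')' then (st.1 ++ [st.2], ([] : List Int)) else st)
      ([], [])).1

-- ===== PRECONDITION & SPEC =====
def Spec_get_line_buttons (line_str : String) (out : List (List Int)) : Prop := out = get_line_buttons_alt line_str
instance (line_str : String) (out : List (List Int)) : Decidable (Spec_get_line_buttons line_str out) := by unfold Spec_get_line_buttons; infer_instance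

-- ===== CLAIM (what is proved, stated in full; the proofs are below) =====
def Claim_equal_get_line_buttons : Prop := ∀ (line_str : String), Dom_get_line_buttons line_str → Spec_get_line_buttons line_str (get_line_buttons line_str)

-- ===== LEMMAS AND PROOFS =====

-- A's inner digit scan of one segment, recursively
def digitsA : List Char → List Int
  | [] => []
  | c :: rest =>
    match pyIntChar c with
    | some n => n :: digitsA rest
    | none => digitsA rest

theorem foldl_digitsA (bs : List Char) (acc : List Int) :
    bs.foldl (fun acc ch =>
      match pyIntChar ch with
      | some num => acc ++ [num]
      | none => acc) acc = acc ++ digitsA bs := by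
  induction bs generalizing acc with
  | nil => simp [digitsA]
  | cons c rest ih =>
    cases h : pyIntChar c with
    | some n => simp [digitsA, List.foldl_cons, h, ih]
    | none => simp [digitsA, List.foldl_cons, h, ih]

-- recursive characterization of splitOn · [')']
def splitOnR : List Char → List (List Char)
  | [] => [[]]
  | c :: rest => if c = ')' then [] :: splitOnR rest else (splitOnR rest).modifyHead (c :: ·)

theorem splitOnR_ne_nil (cs : List Char) : splitOnR cs ≠ [] := by
  cases cs with
  | nil => simp [splitOnR]
  | cons c rest =>
    simp only [splitOnR]
    split_ifs
    · simp
    · cases h : splitOnR rest with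
      | nil => exact absurd h (splitOnR_ne_nil rest)
      | cons p ps => simp

theorem go_spec (fuel : Nat) :
    ∀ (l cur : List Char) (acc : List (List Char)), l.length < fuel →
      PySem.Chars.splitOn.go [')'] fuel l cur acc
        = acc.reverse ++ (splitOnR l).modifyHead (cur.reverse ++ ·) := by
  induction fuel with
  | zero => intro l cur acc h; omega
  | succ fuel ih =>
    intro l cur acc h
    cases l with
    | nil => simp [PySem.Chars.splitOn.go, splitOnR]
    | cons c rest =>
      by_cases hc : c = ')'
      · subst hc
        have hp : List.isPrefixOf [')'] (')' :: rest) = true := by simp [List.isPrefixOf]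
        rw [PySem.Chars.splitOn.go]
        simp only [hp, if_true, List.length_cons, List.length_nil,
          List.drop_succ_cons, List.drop_zero]
        rw [ih rest [] (List.reverse cur :: acc) (by simpa using Nat.lt_of_succ_lt_succ h)]
        cases hs : splitOnR rest with
        | nil => exact absurd hs (splitOnR_ne_nil rest)
        | cons p ps => simp [splitOnR, hs]
      · have hp : List.isPrefixOf [')'] (c :: rest) = false := by
          simp [List.isPrefixOf]
          exact fun hcc => hc hcc.symm
        rw [PySem.Chars.splitOn.go]
        simp only [hp, Bool.false_eq_true, if_false]
        rw [ih rest (c :: cur) acc (by simpa using Nat.lt_of_succ_lt_succ h)]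
        cases hs : splitOnR rest with
        | nil => exact absurd hs (splitOnR_ne_nil rest)
        | cons p ps => simp [splitOnR, hs, hc]

theorem splitOn_eq (cs : List Char) :
    PySem.Chars.splitOn cs [')'] = splitOnR cs := by
  rw [PySem.Chars.splitOn, go_spec (cs.length + 1) cs [] [] (by omega)]
  cases hs : splitOnR cs with
  | nil => exact absurd hs (splitOnR_ne_nil cs)
  | cons p ps => simp

-- A's outer loop is a map
theorem foldl_outer (parts : List (List Char)) (acc : List (List Int)) :
    parts.foldl (fun buttons button_str =>
      buttons ++ [button_str.foldl (fun acc ch =>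
          match pyIntChar ch with
          | some num => acc ++ [num]
          | none => acc) []]) acc = acc ++ parts.map digitsA := by
  induction parts generalizing acc with
  | nil => simp
  | cons p ps ih => rw [List.foldl_cons, ih, foldl_digitsA]; simp

-- B's loop, functionally
def Bfun : List Int → List Char → List (List Int)
  | _, [] => []
  | cur, c :: rest =>
    match pyIntChar c with
    | some n => Bfun (cur ++ [n]) rest
    | none => if c = ')' then cur :: Bfun [] rest else Bfun cur rest

theorem B_loop (cs : List Char) (st : List (List Int) × List Int) :
    (cs.foldl
      (fun (st : List (List Int) × List Int) ch =>
        match pyIntChar ch with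
        | some n => (st.1, st.2 ++ [n])
        | none => if ch = ')' then (st.1 ++ [st.2], ([] : List Int)) else st)
      st).1 = st.1 ++ Bfun st.2 cs := by
  induction cs generalizing st with
  | nil => simp [Bfun]
  | cons c rest ih =>
    cases h : pyIntChar c with
    | some n => simp [List.foldl_cons, h, ih, Bfun]
    | none =>
      by_cases hc : c = ')'
      · subst hc; simp [List.foldl_cons, h, ih, Bfun]
      · simp [List.foldl_cons, h, hc, ih, Bfun]

theorem pyIntChar_rparen : pyIntChar ')' = none := by decide

theorem Bfun_eq (cs : List Char) (cur : List Int) :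
    Bfun cur cs = (((splitOnR cs).map digitsA).modifyHead (cur ++ ·)).dropLast := by
  induction cs generalizing cur with
  | nil => simp [Bfun, splitOnR, digitsA]
  | cons c rest ih =>
    obtain ⟨p, ps, hs⟩ : ∃ p ps, splitOnR rest = p :: ps := by
      cases hs : splitOnR rest with
      | nil => exact absurd hs (splitOnR_ne_nil rest)
      | cons p ps => exact ⟨p, ps, rfl⟩
    cases h : pyIntChar c with
    | some n =>
      have hc : c ≠ ')' := by
        intro hcc; rw [hcc, pyIntChar_rparen] at h; simp at h
      simp only [Bfun, h, splitOnR, hc, if_false, hs, List.modifyHead_cons,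
        List.map_cons, digitsA, ih]
      simp [List.append_assoc]
    | none =>
      by_cases hc : c = ')'
      · subst hc
        simp only [Bfun, h, if_true, splitOnR, hs, List.map_cons,
          List.modifyHead_cons, ih, digitsA]
        simp [List.dropLast_cons_of_ne_nil]
      · simp [Bfun, h, hc, splitOnR, hs, digitsA, ih]

-- ===== VERDICT (by name: the statement is the Claim_ definition above) =====
theorem get_line_buttons_spec : Claim_equal_get_line_buttons := by
  intro line_str _
  unfold Spec_get_line_buttons
  simp only [get_line_buttons, get_line_buttons_alt]
  rw [splitOn_eq, foldl_outer, B_loop, Bfun_eq, PySem.List.slice_to_neg_one]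
  cases hs : splitOnR line_str.toList with
  | nil => exact absurd hs (splitOnR_ne_nil line_str.toList)
  | cons p ps => simp
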